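-- pv_equiv track=rewrite | github.com/okmd/leetcode | dp/lb-12-painting-fence.py | space_optimized
-- ===== SOURCE A (Python) =====
-- def space_optimized(n, k):
--     if n==1:
--         return k
--     if n==2:
--         return k*k
--
--     pre_prev = k
--     prev = k*k
--
--     for _ in range(2, n):
--         temp = prev
--         prev = (k-1)*(prev + pre_prev)%1000000007
--         pre_prev = temp
--
--     return prev
-- ===== SOURCE B (Python) =====
-- M = 1000000007
--
-- def _mmul(X, Y):
--     a, b, c, d = X
--     e, f, g, h = Y
--     return ((a * e + b * g) % M, (a * f + b * h) % M,
--             (c * e + d * g) % M, (c * f + d * h) % M)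
--
-- def space_optimized(n, k):
--     if n == 1:
--         return k
--     if n < 3:
--         return k * k
--     # f(m) = (k-1)*(f(m-1)+f(m-2)) mod M; [[f(m+1)],[f(m)]] = [[a,a],[1,0]]^(m-1) [[k*k],[k]]
--     a = (k - 1) % M
--     res = (1, 0, 0, 1)
--     base = (a, a, 1, 0)
--     e = n - 2
--     while e > 0:
--         if e % 2 == 1:
--             res = _mmul(res, base)
--         base = _mmul(base, base)
--         e //= 2
--     return (res[0] * (k * k) + res[1] * k) % M
-- ===== Notes on version B (the rewrite author's own statement) =====
-- stated objective: faster
-- what changed: Replaces the O(n) linear-recurrence loop by binary exponentiation of the 2x2 companion matrix [[k-1,k-1],[1,0]] mod 1e9+7, combining the result with the seed vector (k*k, k).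
import Mathlib
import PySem

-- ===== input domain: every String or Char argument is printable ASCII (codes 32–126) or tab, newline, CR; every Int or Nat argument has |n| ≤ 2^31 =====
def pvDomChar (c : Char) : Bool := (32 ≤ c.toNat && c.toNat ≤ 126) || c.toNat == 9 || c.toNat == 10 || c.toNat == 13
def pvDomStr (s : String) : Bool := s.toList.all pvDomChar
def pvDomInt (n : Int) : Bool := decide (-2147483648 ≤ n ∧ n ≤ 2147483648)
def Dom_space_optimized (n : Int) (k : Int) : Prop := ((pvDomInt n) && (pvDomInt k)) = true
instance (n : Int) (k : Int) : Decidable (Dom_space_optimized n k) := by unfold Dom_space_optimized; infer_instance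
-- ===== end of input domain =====

-- B replaces A's O(n) recurrence loop by binary exponentiation of the 2x2 companion matrix mod 1e9+7 (objective: faster, asymptotic).

-- ===== PORT A =====
def space_optimized (n : Int) (k : Int) : Int :=
  if n = 1 then k
  else if n = 2 then k * k
  else
    -- state (pre_prev, prev); for _ in range(2, n): temp=prev; prev=(k-1)*(prev+pre_prev)%1000000007; pre_prev=temp
    let s := (PySem.List.pyRange 2 n 1).foldl
      (fun (st : Int × Int) _ => (st.2, PySem.Int.mod ((k - 1) * (st.2 + st.1)) 1000000007))
      (k, k * k)
    s.2

-- ===== PORT B =====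
-- 2x2 matrix ((a,b),(c,d)) as flat 4-tuple; entries kept reduced mod 1000000007 (Source B's _mmul)
def bmulM (X Y : Int × Int × Int × Int) : Int × Int × Int × Int :=
  (PySem.Int.mod (X.1 * Y.1 + X.2.1 * Y.2.2.1) 1000000007,
   PySem.Int.mod (X.1 * Y.2.1 + X.2.1 * Y.2.2.2) 1000000007,
   PySem.Int.mod (X.2.2.1 * Y.1 + X.2.2.2 * Y.2.2.1) 1000000007,
   PySem.Int.mod (X.2.2.1 * Y.2.1 + X.2.2.2 * Y.2.2.2) 1000000007)

-- Source B's 'while e > 0' binary-exponentiation loop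
def bpowLoop (res base : Int × Int × Int × Int) (e : Int) : Int × Int × Int × Int :=
  if _h : 0 < e then
    bpowLoop (if PySem.Int.mod e 2 = 1 then bmulM res base else res)
             (bmulM base base) (PySem.Int.floordiv e 2)
  else res
termination_by e.toNat
decreasing_by
  have : PySem.Int.floordiv e 2 = e / 2 := PySem.Int.floordiv_eq_ediv_of_pos (by norm_num)
  rw [this]; omega

def space_optimized_alt (n : Int) (k : Int) : Int :=
  if n = 1 then k
  else if n < 3 then k * k
  else
    let a := PySem.Int.mod (k - 1) 1000000007
    let P := bpowLoop (1, 0, 0, 1) (a, a, 1, 0) (n - 2)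
    PySem.Int.mod (P.1 * (k * k) + P.2.1 * k) 1000000007

-- ===== PRECONDITION & SPEC =====
def Spec_space_optimized (n : Int) (k : Int) (out : Int) : Prop := out = space_optimized_alt n k
instance (n : Int) (k : Int) (out : Int) : Decidable (Spec_space_optimized n k out) := by unfold Spec_space_optimized; infer_instance

-- ===== CLAIM (what is proved, stated in full; the proofs are below) =====
def Claim_equal_space_optimized : Prop := ∀ (n : Int) (k : Int), Dom_space_optimized n k → Spec_space_optimized n k (space_optimized n k)

-- ===== LEMMAS AND PROOFS =====

-- exact integer (no-mod) counterparts used as the common reference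
def zmul (X Y : Int × Int × Int × Int) : Int × Int × Int × Int :=
  (X.1 * Y.1 + X.2.1 * Y.2.2.1,
   X.1 * Y.2.1 + X.2.1 * Y.2.2.2,
   X.2.2.1 * Y.1 + X.2.2.2 * Y.2.2.1,
   X.2.2.1 * Y.2.1 + X.2.2.2 * Y.2.2.2)

def zpow (B : Int × Int × Int × Int) : Nat → Int × Int × Int × Int
  | 0 => (1, 0, 0, 1)
  | t + 1 => zmul (zpow B t) B

-- matrix applied to a column vector
def vapp (P : Int × Int × Int × Int) (v : Int × Int) : Int × Int :=
  (P.1 * v.1 + P.2.1 * v.2, P.2.2.1 * v.1 + P.2.2.2 * v.2)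

-- entrywise congruence mod 1000000007
def mcong (X Y : Int × Int × Int × Int) : Prop :=
  X.1 ≡ Y.1 [ZMOD 1000000007] ∧ X.2.1 ≡ Y.2.1 [ZMOD 1000000007] ∧
  X.2.2.1 ≡ Y.2.2.1 [ZMOD 1000000007] ∧ X.2.2.2 ≡ Y.2.2.2 [ZMOD 1000000007]

theorem pymod_eq_emod (z : Int) : PySem.Int.mod z 1000000007 = z % 1000000007 :=
  PySem.Int.mod_eq_emod_of_pos (by norm_num)

theorem modM_cong (z : Int) : (z % 1000000007) ≡ z [ZMOD 1000000007] :=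
  Int.emod_emod_of_dvd z dvd_rfl

theorem pymod_cong (z : Int) : PySem.Int.mod z 1000000007 ≡ z [ZMOD 1000000007] := by
  rw [pymod_eq_emod]; exact modM_cong z

theorem mcong_refl (X : Int × Int × Int × Int) : mcong X X :=
  ⟨Int.ModEq.refl _, Int.ModEq.refl _, Int.ModEq.refl _, Int.ModEq.refl _⟩

theorem mcong_mul {X X' Y Y' : Int × Int × Int × Int} (hX : mcong X X') (hY : mcong Y Y') :
    mcong (bmulM X Y) (zmul X' Y') := by
  obtain ⟨h1, h2, h3, h4⟩ := hX
  obtain ⟨g1, g2, g3, g4⟩ := hY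
  refine ⟨?_, ?_, ?_, ?_⟩ <;>
    exact (pymod_cong _).trans (Int.ModEq.add (Int.ModEq.mul (by assumption) (by assumption))
      (Int.ModEq.mul (by assumption) (by assumption)))

theorem zmul_assoc (X Y Z : Int × Int × Int × Int) : zmul (zmul X Y) Z = zmul X (zmul Y Z) := by
  obtain ⟨a, b, c, d⟩ := X; obtain ⟨e, f, g, h⟩ := Y; obtain ⟨i, j, l, m⟩ := Z
  simp only [zmul]; refine Prod.ext ?_ (Prod.ext ?_ (Prod.ext ?_ ?_)) <;> ring

theorem zmul_one (X : Int × Int × Int × Int) : zmul X (1, 0, 0, 1) = X := by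
  obtain ⟨a, b, c, d⟩ := X
  simp only [zmul]; refine Prod.ext ?_ (Prod.ext ?_ (Prod.ext ?_ ?_)) <;> ring

theorem one_zmul (X : Int × Int × Int × Int) : zmul (1, 0, 0, 1) X = X := by
  obtain ⟨a, b, c, d⟩ := X
  simp only [zmul]; refine Prod.ext ?_ (Prod.ext ?_ (Prod.ext ?_ ?_)) <;> ring

theorem zpowm_comm (B : Int × Int × Int × Int) (t : Nat) :
    zmul B (zpow B t) = zmul (zpow B t) B := by
  induction t with
  | zero => rw [zpow, zmul_one, one_zmul]
  | succ t ih => rw [zpow, ← zmul_assoc, ih]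

theorem zpowm_succ_left (B : Int × Int × Int × Int) (t : Nat) :
    zpow B (t + 1) = zmul B (zpow B t) := by
  rw [zpow, zpowm_comm]

theorem zpowm_sq (B : Int × Int × Int × Int) (t : Nat) :
    zpow (zmul B B) t = zpow B (2 * t) := by
  induction t with
  | zero => rfl
  | succ t ih =>
    rw [zpow, ih, show 2 * (t + 1) = 2 * t + 1 + 1 from by ring, zpow, zpow, zmul_assoc]

-- binary-exponentiation loop invariant: bpowLoop res base e ≡ res * base^e (entrywise mod 1e9+7)
theorem bpowLoop_cong (m : Nat) : ∀ (e : Int), e.toNat = m → 0 ≤ e →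
    ∀ (res base R B : Int × Int × Int × Int), mcong res R → mcong base B →
    mcong (bpowLoop res base e) (zmul R (zpow B e.toNat)) := by
  induction m using Nat.strong_induction_on with
  | _ m ih =>
    intro e hm he res base R B hres hbase
    by_cases hpos : 0 < e
    · rw [bpowLoop, dif_pos hpos]
      have hfd : PySem.Int.floordiv e 2 = e / 2 := PySem.Int.floordiv_eq_ediv_of_pos (by norm_num)
      have hlt : (e / 2).toNat < m := by omega
      have hhalf := ih _ hlt (e / 2) rfl (by omega)
        (if PySem.Int.mod e 2 = 1 then bmulM res base else res) (bmulM base base)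
        (if PySem.Int.mod e 2 = 1 then zmul R B else R) (zmul B B)
        (by split_ifs with h
            · exact mcong_mul hres hbase
            · exact hres)
        (mcong_mul hbase hbase)
      rw [hfd]
      have hmod2 : PySem.Int.mod e 2 = e % 2 := PySem.Int.mod_eq_emod_of_pos (by norm_num)
      by_cases hodd : PySem.Int.mod e 2 = 1
      · simp only [if_pos hodd] at hhalf ⊢
        rw [zpowm_sq] at hhalf
        have h1 : e.toNat = 2 * (e / 2).toNat + 1 := by rw [hmod2] at hodd; omega
        rw [h1, zpowm_succ_left, ← zmul_assoc]
        exact hhalf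
      · simp only [if_neg hodd] at hhalf ⊢
        rw [zpowm_sq] at hhalf
        have h0 : e.toNat = 2 * (e / 2).toNat := by rw [hmod2] at hodd; omega
        rw [h0]
        exact hhalf
    · rw [bpowLoop, dif_neg hpos]
      have : e.toNat = 0 := by omega
      rw [this, zpow, zmul_one]
      exact hres

theorem vapp_zmul (P Q : Int × Int × Int × Int) (v : Int × Int) :
    vapp (zmul P Q) v = vapp P (vapp Q v) := by
  obtain ⟨a, b, c, d⟩ := P; obtain ⟨e, f, g, h⟩ := Q; obtain ⟨x, y⟩ := v
  simp only [zmul, vapp]; refine Prod.ext ?_ ?_ <;> ring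

-- exact (no-mod) recurrence state (prev, pre_prev)
def uZ (k : Int) : Nat → Int × Int
  | 0 => (k * k, k)
  | t + 1 => ((k - 1) * ((uZ k t).1 + (uZ k t).2), (uZ k t).1)

theorem uZ_eq_vapp (k : Int) (t : Nat) :
    uZ k t = vapp (zpow (k - 1, k - 1, 1, 0) t) (k * k, k) := by
  induction t with
  | zero => simp [uZ, zpow, vapp]
  | succ t ih =>
    rw [zpowm_succ_left, vapp_zmul, ← ih]
    simp only [uZ, vapp]; refine Prod.ext ?_ ?_ <;> ring

-- A's loop step
def astep (k : Int) (st : Int × Int) : Int × Int :=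
  (st.2, PySem.Int.mod ((k - 1) * (st.2 + st.1)) 1000000007)

theorem foldl_const {α β : Type} (f : α → α) (init : α) (l : List β) :
    l.foldl (fun s _ => f s) init = f^[l.length] init := by
  induction l generalizing init with
  | nil => rfl
  | cons x xs ih => simp [List.foldl_cons, ih, Function.iterate_succ_apply]

-- A's state is congruent to the exact recurrence (components swapped: state = (pre_prev, prev))
theorem astep_cong (k : Int) (t : Nat) :
    ((astep k)^[t] (k, k * k)).1 ≡ (uZ k t).2 [ZMOD 1000000007] ∧
    ((astep k)^[t] (k, k * k)).2 ≡ (uZ k t).1 [ZMOD 1000000007] := by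
  induction t with
  | zero => exact ⟨Int.ModEq.refl _, Int.ModEq.refl _⟩
  | succ t ih =>
    obtain ⟨h1, h2⟩ := ih
    rw [Function.iterate_succ_apply']
    refine ⟨h2, ?_⟩
    exact (pymod_cong _).trans (Int.ModEq.mul (Int.ModEq.refl _) (Int.ModEq.add h2 h1))

theorem astep_iter_emod (k : Int) (t : Nat) (ht : 1 ≤ t) :
    ((astep k)^[t] (k, k * k)).2 % 1000000007 = ((astep k)^[t] (k, k * k)).2 := by
  obtain ⟨s, rfl⟩ := Nat.exists_eq_add_of_le ht
  rw [Nat.add_comm, Function.iterate_succ_apply', astep, pymod_eq_emod]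
  exact Int.emod_emod_of_dvd _ dvd_rfl

-- ===== VERDICT (by name: the statement is the Claim_ definition above) =====
theorem space_optimized_spec : Claim_equal_space_optimized := by
  intro n k _
  unfold Spec_space_optimized space_optimized space_optimized_alt
  by_cases h1 : n = 1
  · simp [h1]
  by_cases h3 : n < 3
  · have hn2 : PySem.List.pyRange 2 n 1 = [] := PySem.List.pyRange_one_eq_nil (by omega)
    by_cases h2 : n = 2 <;> simp [h1, h2, h3, hn2]
  · -- main case: n ≥ 3
    rw [if_neg h1, if_neg (by omega : ¬ n = 2), if_neg h1, if_neg h3]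
    set t : Nat := (n - 2).toNat with hT
    have hfold : (PySem.List.pyRange 2 n 1).foldl
        (fun (st : Int × Int) _ => (st.2, PySem.Int.mod ((k - 1) * (st.2 + st.1)) 1000000007))
        (k, k * k) = (astep k)^[t] (k, k * k) := by
      have := foldl_const (astep k) (k, k * k) (PySem.List.pyRange 2 n 1)
      simp only [astep] at this
      rw [this, PySem.List.length_pyRange_one]
    simp only [hfold]
    -- B's matrix power is congruent to the exact companion-matrix power
    have hP := bpowLoop_cong (n - 2).toNat (n - 2) rfl (by omega)
      (1, 0, 0, 1) (PySem.Int.mod (k - 1) 1000000007, PySem.Int.mod (k - 1) 1000000007, 1, 0)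
      (1, 0, 0, 1) (k - 1, k - 1, 1, 0) (mcong_refl _)
      ⟨pymod_cong _, pymod_cong _, Int.ModEq.refl _, Int.ModEq.refl _⟩
    rw [one_zmul] at hP
    obtain ⟨hp1, hp2, _, _⟩ := hP
    obtain ⟨_, ha2⟩ := astep_cong k t
    -- congruence of the two inner expressions
    have hcong : ((astep k)^[t] (k, k * k)).2 ≡
        (bpowLoop (1, 0, 0, 1)
          (PySem.Int.mod (k - 1) 1000000007, PySem.Int.mod (k - 1) 1000000007, 1, 0) (n - 2)).1
          * (k * k) +
        (bpowLoop (1, 0, 0, 1)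
          (PySem.Int.mod (k - 1) 1000000007, PySem.Int.mod (k - 1) 1000000007, 1, 0) (n - 2)).2.1
          * k [ZMOD 1000000007] := by
      have huv : (uZ k t).1 = (zpow (k - 1, k - 1, 1, 0) t).1 * (k * k)
          + (zpow (k - 1, k - 1, 1, 0) t).2.1 * k := by
        rw [uZ_eq_vapp]; rfl
      calc ((astep k)^[t] (k, k * k)).2
          ≡ (uZ k t).1 [ZMOD 1000000007] := ha2
        _ = _ := huv
        _ ≡ _ [ZMOD 1000000007] :=
            Int.ModEq.add (Int.ModEq.mul hp1.symm (Int.ModEq.refl _))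
              (Int.ModEq.mul hp2.symm (Int.ModEq.refl _))
    have ht1 : 1 ≤ t := by omega
    rw [pymod_eq_emod]
    rw [← astep_iter_emod k t ht1]
    exact hcong
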